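-- pv_equiv track=rewrite | github.com/MankyDanky/leetcode-practice | max_area_square_hole_in_grid.py | maximizeSquareHoleArea
-- ===== SOURCE A (Python) =====
-- from typing import List
--
-- def maximizeSquareHoleArea(n: int, m: int, hBars: List[int], vBars: List[int]) -> int:
--     res = 1
--     hBars.sort()
--     vBars.sort()
--     for i in range(0, len(hBars)):
--         for j in range(0, len(vBars)):
--             count = 1
--             while i + count < len(hBars) and j + count < len(vBars):
--                 if hBars[i+count] == hBars[i] + count and vBars[j+count] == vBars[j] + count:
--                     count+=1
--                 else:
--                     break
--             count += 1
--
--             res = max(res, count*count)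
--     return res
-- ===== SOURCE B (Python) =====
-- from typing import List
--
-- # B: sort each bar list once, find its longest run of consecutive integers in a
-- # single linear scan, and return (min(runH, runV) + 1) ** 2 directly -- O(n log n + m log m)
-- # instead of A's O(n * m * min(n, m)) triple-nested scan.
-- # Note: A sorts hBars/vBars in place; B does not mutate its arguments (return value is identical).
--
-- def maximizeSquareHoleArea(n: int, m: int, hBars: List[int], vBars: List[int]) -> int:
--     def longest_run(bars):
--         best = cur = 0
--         prev = None
--         for x in sorted(bars):
--             cur = cur + 1 if prev is not None and x == prev + 1 else 1
--             if cur > best: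
--                 best = cur
--             prev = x
--         return best
--
--     side = min(longest_run(hBars), longest_run(vBars)) + 1
--     return side * side
-- ===== Notes on version B (the rewrite author's own statement) =====
-- stated objective: faster
-- what changed: A scans every (i,j) start pair with an inner while loop; B computes the longest consecutive run of each sorted bar list independently in one linear pass and returns (min(runH,runV)+1)**2 in closed form.
import Mathlib
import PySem

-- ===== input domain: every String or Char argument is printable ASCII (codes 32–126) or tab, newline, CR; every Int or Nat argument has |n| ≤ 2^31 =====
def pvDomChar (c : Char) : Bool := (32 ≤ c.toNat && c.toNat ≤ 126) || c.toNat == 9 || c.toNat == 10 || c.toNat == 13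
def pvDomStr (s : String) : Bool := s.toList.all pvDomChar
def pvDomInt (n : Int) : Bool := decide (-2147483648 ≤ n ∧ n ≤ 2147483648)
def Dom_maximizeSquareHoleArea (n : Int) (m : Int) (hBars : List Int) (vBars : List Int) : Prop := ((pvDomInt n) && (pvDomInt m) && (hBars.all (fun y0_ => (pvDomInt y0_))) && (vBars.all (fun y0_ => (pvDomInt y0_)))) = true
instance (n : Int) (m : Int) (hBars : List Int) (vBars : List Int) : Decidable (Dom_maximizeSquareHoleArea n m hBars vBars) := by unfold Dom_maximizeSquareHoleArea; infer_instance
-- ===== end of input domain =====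

-- B replaces A's triple-nested scan by one linear run-scan per sorted list and a closed-form
-- (min(runH,runV)+1)^2; equivalence is about the RETURN value only (A sorts hBars/vBars in
-- place, B does not mutate its arguments).

-- ===== PORT A =====
-- the while loop of A: `count` grows while both indexed arithmetic-progression checks hold;
-- it adds at most hs.length steps, so fuel = hs.length + vs.length makes the recursion total
-- without changing any computed value. Indices are guarded in range and nonnegative, so
-- List.getD is exactly Python's hBars[i+count] here.
def pvWhileA (hs vs : List Int) (i j : Nat) (count : Nat) : Nat → Nat
  | 0 => count
  | fuel+1 =>
    if i + count < hs.length ∧ j + count < vs.length then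
      if hs.getD (i+count) 0 = hs.getD i 0 + (count : Int) ∧
         vs.getD (j+count) 0 = vs.getD j 0 + (count : Int) then
        pvWhileA hs vs i j (count+1) fuel
      else count
    else count

def maximizeSquareHoleArea (n : Int) (m : Int) (hBars : List Int) (vBars : List Int) : Int :=
  let hs := PySem.List.sorted hBars id false   -- hBars.sort()
  let vs := PySem.List.sorted vBars id false   -- vBars.sort()
  (List.range hs.length).foldl (fun res i =>
    (List.range vs.length).foldl (fun res j =>
      let count := pvWhileA hs vs i j 1 (hs.length + vs.length) + 1   -- while …; count += 1
      max res ((count : Int) * (count : Int))) res) 1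

-- ===== PORT B =====
-- loop body of Source B's longest_run: state (prev, cur, best)
def pvRunStep (st : Option Int × Nat × Nat) (x : Int) : Option Int × Nat × Nat :=
  let cur := match st.1 with
    | some p => if x = p + 1 then st.2.1 + 1 else 1
    | none => 1
  (some x, cur, if cur > st.2.2 then cur else st.2.2)

def pvLongestRun (bars : List Int) : Nat :=
  ((PySem.List.sorted bars id false).foldl pvRunStep (none, 0, 0)).2.2

def maximizeSquareHoleArea_alt (n : Int) (m : Int) (hBars : List Int) (vBars : List Int) : Int :=
  let side : Nat := min (pvLongestRun hBars) (pvLongestRun vBars) + 1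
  ((side * side : Nat) : Int)

-- ===== PRECONDITION & SPEC =====
def Spec_maximizeSquareHoleArea (n : Int) (m : Int) (hBars : List Int) (vBars : List Int) (out : Int) : Prop := out = maximizeSquareHoleArea_alt n m hBars vBars
instance (n : Int) (m : Int) (hBars : List Int) (vBars : List Int) (out : Int) : Decidable (Spec_maximizeSquareHoleArea n m hBars vBars out) := by unfold Spec_maximizeSquareHoleArea; infer_instance

-- ===== CLAIM (what is proved, stated in full; the proofs are below) =====
def Claim_equal_maximizeSquareHoleArea : Prop := ∀ (n : Int) (m : Int) (hBars : List Int) (vBars : List Int), Dom_maximizeSquareHoleArea n m hBars vBars → Spec_maximizeSquareHoleArea n m hBars vBars (maximizeSquareHoleArea n m hBars vBars)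

-- ===== LEMMAS AND PROOFS =====

-- length of the consecutive chain p+1, p+2, … found as a prefix of a list
def pvChain : Int → List Int → Nat
  | _, [] => 0
  | p, y :: ys => if y = p + 1 then 1 + pvChain y ys else 0

-- longest consecutive run in a list (max over all start positions)
def pvMaxRun : List Int → Nat
  | [] => 0
  | x :: xs => max (1 + pvChain x xs) (pvMaxRun xs)

-- single-list counterpart of A's while loop
def pvOneC (l : List Int) (i : Nat) (count : Nat) : Nat → Nat
  | 0 => count
  | fuel+1 =>
    if i + count < l.length ∧ l.getD (i+count) 0 = l.getD i 0 + (count : Int) then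
      pvOneC l i (count+1) fuel
    else count

def pvNatMax (L : List Nat) : Nat := L.foldl max 0

def pvF (a b : Nat) : Nat := (min a b + 1) * (min a b + 1)

theorem pvOneC_ge (l : List Int) (i : Nat) : ∀ (fuel count : Nat), count ≤ pvOneC l i count fuel := by
  intro fuel
  induction fuel with
  | zero => intro c; simp [pvOneC]
  | succ f ih =>
    intro c
    simp only [pvOneC]
    split
    · exact le_trans (Nat.le_succ c) (ih (c+1))
    · exact le_refl c

theorem pvWhileA_eq_min (hs vs : List Int) (i j : Nat) :
    ∀ (fuel count : Nat), pvWhileA hs vs i j count fuel = min (pvOneC hs i count fuel) (pvOneC vs j count fuel) := by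
  intro fuel
  induction fuel with
  | zero => intro c; simp [pvWhileA, pvOneC]
  | succ f ih =>
    intro c
    by_cases hh : i + c < hs.length ∧ hs.getD (i+c) 0 = hs.getD i 0 + (c : Int)
    · by_cases hv : j + c < vs.length ∧ vs.getD (j+c) 0 = vs.getD j 0 + (c : Int)
      · have hb77 : i + c < hs.length ∧ j + c < vs.length := ⟨hh.1, hv.1⟩
        have he77 : hs.getD (i+c) 0 = hs.getD i 0 + (c : Int) ∧ vs.getD (j+c) 0 = vs.getD j 0 + (c : Int) := ⟨hh.2, hv.2⟩
        simp only [pvWhileA, pvOneC, if_pos hh, if_pos hv, if_pos hb77, if_pos he77]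
        exact ih (c+1)
      · -- vs side stops at c
        have h2 : pvOneC vs j c (f+1) = c := by simp only [pvOneC, if_neg hv]
        have hle : c ≤ pvOneC hs i c (f+1) := pvOneC_ge hs i (f+1) c
        have hw : pvWhileA hs vs i j c (f+1) = c := by
          simp only [pvWhileA]
          split
          · split
            · rename_i hb he; exact absurd ⟨hb.2, he.2⟩ hv
            · rfl
          · rfl
        omega
    · have h2 : pvOneC hs i c (f+1) = c := by simp only [pvOneC, if_neg hh]
      have hle : c ≤ pvOneC vs j c (f+1) := pvOneC_ge vs j (f+1) c
      have hw : pvWhileA hs vs i j c (f+1) = c := by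
        simp only [pvWhileA]
        split
        · split
          · rename_i hb he; exact absurd ⟨hb.1, he.1⟩ hh
          · rfl
        · rfl
      omega

theorem pvOneC_eq_chain (l : List Int) (i : Nat) :
    ∀ (fuel count : Nat), 0 < count → i < l.length → l.length ≤ i + count + fuel →
      pvOneC l i count fuel = count + pvChain (l.getD i 0 + (count : Int) - 1) (l.drop (i + count)) := by
  intro fuel
  induction fuel with
  | zero =>
    intro c hc hi hlen
    have : l.drop (i + c) = [] := List.drop_eq_nil_of_le (by omega)
    simp [pvOneC, this, pvChain]
  | succ f ih =>
    intro c hc hi hlen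
    by_cases hb : i + c < l.length
    · have hdrop : l.drop (i + c) = l[i+c] :: l.drop (i + c + 1) := List.drop_eq_getElem_cons hb
      have hgd : l.getD (i+c) 0 = l[i+c] := List.getD_eq_getElem l 0 hb
      by_cases he : l.getD (i+c) 0 = l.getD i 0 + (c : Int)
      · have hbe : i + c < l.length ∧ l.getD (i+c) 0 = l.getD i 0 + (c : Int) := ⟨hb, he⟩
        have h0 : pvOneC l i c (f+1) = pvOneC l i (c+1) f := by
          simp only [pvOneC, if_pos hbe]
        rw [h0, ih (c+1) (by omega) hi (by omega), hdrop]
        simp only [pvChain]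
        have hx1 : l[i+c] = (l.getD i 0 + ((c:Nat)+1:Int) - 1) + 1 - 1 := by rw [← hgd, he]; push_cast; ring
        have hcond : l[i+c] = (l.getD i 0 + (c:Int)) := by rw [← hgd, he]
        rw [if_pos (by rw [hcond]; push_cast; ring)]
        have hy : l.getD i 0 + (((c:Nat)+1:Nat):Int) - 1 = l[i+c] := by rw [hcond]; push_cast; ring
        rw [hy]
        have hz : i + (c + 1) = i + c + 1 := by omega
        rw [hz]
        omega
      · have hne : ¬ (i + c < l.length ∧ l.getD (i+c) 0 = l.getD i 0 + (c : Int)) := by tauto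
        have h1 : pvOneC l i c (f+1) = c := by simp only [pvOneC, if_neg hne]
        rw [h1, hdrop]
        simp only [pvChain]
        rw [if_neg (by rw [← hgd]; intro hcon; exact he (by omega))]
        omega
    · have : l.drop (i + c) = [] := List.drop_eq_nil_of_le (by omega)
      simp [pvOneC, this, pvChain, hb]

theorem pvFoldl_max_init : ∀ (L : List Nat) (x y : Nat), L.foldl max (max x y) = max x (L.foldl max y) := by
  intro L
  induction L with
  | nil => intro x y; simp
  | cons z zs ih =>
    intro x y
    simp only [List.foldl_cons]
    rw [Nat.max_assoc, ih]

theorem pvNatMax_cons (a : Nat) (L : List Nat) : pvNatMax (a :: L) = max a (pvNatMax L) := by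
  simp only [pvNatMax, List.foldl_cons, Nat.zero_max]
  have := pvFoldl_max_init L a 0
  simpa [Nat.max_comm] using this

theorem pvF_max (f : Nat → Nat) (hf : ∀ b c : Nat, b ≤ c → f b ≤ f c) (b c : Nat) :
    f (max b c) = max (f b) (f c) := by
  rcases Nat.le_total b c with h | h
  · rw [Nat.max_eq_right h, Nat.max_eq_right (hf _ _ h)]
  · rw [Nat.max_eq_left h, Nat.max_eq_left (hf _ _ h)]

theorem pvF_mono_right (a : Nat) : ∀ b c : Nat, b ≤ c → pvF a b ≤ pvF a c := by
  intro b c h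
  have : min a b ≤ min a c := by omega
  exact Nat.mul_le_mul (by omega) (by omega)

theorem pvF_mono_left (b : Nat) : ∀ a c : Nat, a ≤ c → pvF a b ≤ pvF c b := by
  intro a c h
  have : min a b ≤ min c b := by omega
  exact Nat.mul_le_mul (by omega) (by omega)

theorem pvFoldl_max_f (f : Nat → Nat) (hf : ∀ b c : Nat, b ≤ c → f b ≤ f c) :
    ∀ (L : List Nat) (r : Int), L ≠ [] →
      L.foldl (fun r b => max r ((f b : Nat) : Int)) r = max r ((f (pvNatMax L) : Nat) : Int) := by
  intro L
  induction L with
  | nil => intro r h; exact absurd rfl h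
  | cons b bs ih =>
    intro r _
    simp only [List.foldl_cons]
    rcases eq_or_ne bs [] with hbs | hbs
    · subst hbs
      simp [pvNatMax]
    · rw [ih _ hbs, pvNatMax_cons, pvF_max f hf b (pvNatMax bs)]
      push_cast
      omega

-- pvMaxRun as the max over start indices of 1 + chain
theorem pvMaxRun_eq_natMax (l : List Int) :
    pvMaxRun l = pvNatMax ((List.range l.length).map (fun i => 1 + pvChain (l.getD i 0) (l.drop (i+1)))) := by
  induction l with
  | nil => simp [pvMaxRun, pvNatMax]
  | cons x xs ih =>
    simp only [List.length_cons, List.range_succ_eq_map, List.map_cons, List.map_map]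
    rw [pvNatMax_cons]
    simp only [pvMaxRun]
    have h1 : 1 + pvChain ((x :: xs).getD 0 0) ((x :: xs).drop (0+1)) = 1 + pvChain x xs := by simp
    have h2 : ((List.range xs.length).map
          ((fun i => 1 + pvChain ((x :: xs).getD i 0) ((x :: xs).drop (i+1))) ∘ Nat.succ))
        = (List.range xs.length).map (fun i => 1 + pvChain (xs.getD i 0) (xs.drop (i+1))) := by
      apply List.map_congr_left
      intro i _
      simp [Function.comp]
    rw [h1, h2, ← ih]

-- B's fold computes pvMaxRun of the sorted list
theorem pvFoldB (ys : List Int) : ∀ (p : Int) (cur best : Nat), cur ≤ best →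
    ((ys.foldl pvRunStep (some p, cur, best)).2.2 : Nat) = max best (max (cur + pvChain p ys) (pvMaxRun ys)) := by
  induction ys with
  | nil => intro p cur best h; simp [pvChain, pvMaxRun]; omega
  | cons x xs ih =>
    intro p cur best h
    by_cases hx : x = p + 1
    · have hstep : pvRunStep (some p, cur, best) x = (some x, cur + 1, if cur + 1 > best then cur + 1 else best) := by
        simp [pvRunStep, hx]
      simp only [List.foldl_cons, hstep]
      rw [ih x (cur+1) _ (by split <;> omega)]
      simp only [pvChain, if_pos hx, pvMaxRun]
      split <;> omega
    · have hstep : pvRunStep (some p, cur, best) x = (some x, 1, if 1 > best then 1 else best) := by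
        simp [pvRunStep, hx]
      simp only [List.foldl_cons, hstep]
      rw [ih x 1 _ (by split <;> omega)]
      simp only [pvChain, if_neg hx, pvMaxRun]
      split <;> omega

theorem pvLongestRun_eq (l : List Int) : pvLongestRun l = pvMaxRun (PySem.List.sorted l id false) := by
  unfold pvLongestRun
  cases hs : PySem.List.sorted l id false with
  | nil => simp [pvMaxRun]
  | cons x xs =>
    have hstep : pvRunStep (none, 0, 0) x = (some x, 1, 1) := by simp [pvRunStep]
    simp only [List.foldl_cons, hstep]
    rw [pvFoldB xs x 1 1 (le_refl 1)]
    simp only [pvMaxRun]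
    omega

-- fold over a list where every step leaves the accumulator unchanged
theorem pvFoldl_id {α : Type} : ∀ (L : List α) (r : Int), L.foldl (fun r _ => r) r = r := by
  intro L
  induction L with
  | nil => intro r; rfl
  | cons x xs ih => intro r; simp only [List.foldl_cons]; exact ih r

-- core: A's double fold on the sorted lists equals the closed form
theorem pvCore (hs vs : List Int) :
    (List.range hs.length).foldl (fun res i =>
      (List.range vs.length).foldl (fun res j =>
        let count := pvWhileA hs vs i j 1 (hs.length + vs.length) + 1
        max res ((count : Int) * (count : Int))) res) 1
    = (((min (pvMaxRun hs) (pvMaxRun vs) + 1) * (min (pvMaxRun hs) (pvMaxRun vs) + 1) : Nat) : Int) := by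
  rcases eq_or_ne hs.length 0 with hh | hh
  · have : hs = [] := List.eq_nil_of_length_eq_zero hh
    subst this
    simp [pvMaxRun]
  rcases eq_or_ne vs.length 0 with hv | hv
  · have : vs = [] := List.eq_nil_of_length_eq_zero hv
    subst this
    simp only [List.length_nil, List.range_zero, List.foldl_nil]
    rw [pvFoldl_id]
    simp [pvMaxRun]
  -- both nonempty
  set a : Nat → Nat := fun i => 1 + pvChain (hs.getD i 0) (hs.drop (i+1)) with ha
  set b : Nat → Nat := fun j => 1 + pvChain (vs.getD j 0) (vs.drop (j+1)) with hb
  have hcount : ∀ i ∈ List.range hs.length, ∀ j ∈ List.range vs.length,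
      pvWhileA hs vs i j 1 (hs.length + vs.length) = min (a i) (b j) := by
    intro i hi j hj
    rw [List.mem_range] at hi hj
    rw [pvWhileA_eq_min]
    rw [pvOneC_eq_chain hs i _ 1 (by omega) hi (by omega)]
    rw [pvOneC_eq_chain vs j _ 1 (by omega) hj (by omega)]
    simp [ha, hb]
  -- rewrite the inner fold into max with pvF (a i) (pvMaxRun vs)
  have hQne : ((List.range vs.length).map b) ≠ [] := by
    simp [List.map_eq_nil_iff, List.range_eq_nil, hv]
  have hPne : ((List.range hs.length).map a) ≠ [] := by
    simp [List.map_eq_nil_iff, List.range_eq_nil, hh]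
  have hMV : pvNatMax ((List.range vs.length).map b) = pvMaxRun vs := by
    rw [pvMaxRun_eq_natMax vs]
  have hMH : pvNatMax ((List.range hs.length).map a) = pvMaxRun hs := by
    rw [pvMaxRun_eq_natMax hs]
  have hinner : ∀ i ∈ List.range hs.length, ∀ (r : Int),
      (List.range vs.length).foldl (fun res j =>
        let count := pvWhileA hs vs i j 1 (hs.length + vs.length) + 1
        max res ((count : Int) * (count : Int))) r
      = max r ((pvF (a i) (pvMaxRun vs) : Nat) : Int) := by
    intro i hi r
    have hbody : (List.range vs.length).foldl (fun res j =>
        let count := pvWhileA hs vs i j 1 (hs.length + vs.length) + 1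
        max res ((count : Int) * (count : Int))) r
        = (List.range vs.length).foldl (fun res j => max res ((pvF (a i) (b j) : Nat) : Int)) r := by
      apply List.foldl_ext
      intro res j hj
      rw [hcount i hi j hj]
      simp only [pvF]
      push_cast
      ring_nf
    rw [hbody,
      ← List.foldl_map (f := b) (g := fun res bv => max res ((pvF (a i) bv : Nat) : Int))
        (l := List.range vs.length) (init := r)]
    rw [pvFoldl_max_f (fun bv => pvF (a i) bv) (pvF_mono_right (a i)) _ r hQne, hMV]
  have houter : (List.range hs.length).foldl (fun res i =>
      (List.range vs.length).foldl (fun res j =>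
        let count := pvWhileA hs vs i j 1 (hs.length + vs.length) + 1
        max res ((count : Int) * (count : Int))) res) 1
      = (List.range hs.length).foldl (fun res i => max res ((pvF (a i) (pvMaxRun vs) : Nat) : Int)) 1 := by
    apply List.foldl_ext
    intro res i hi
    exact hinner i hi res
  rw [houter,
    ← List.foldl_map (f := a) (g := fun res av => max res ((pvF av (pvMaxRun vs) : Nat) : Int))
      (l := List.range hs.length) (init := (1 : Int))]
  rw [pvFoldl_max_f (fun av => pvF av (pvMaxRun vs)) (fun x y hxy => pvF_mono_left (pvMaxRun vs) x y hxy) _ 1 hPne, hMH]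
  have h1le : (1 : Int) ≤ ((pvF (pvMaxRun hs) (pvMaxRun vs) : Nat) : Int) := by
    have : 1 ≤ pvF (pvMaxRun hs) (pvMaxRun vs) := Nat.one_le_iff_ne_zero.mpr (by simp [pvF])
    exact_mod_cast this
  rw [max_eq_right h1le]
  simp [pvF]

-- ===== VERDICT (by name: the statement is the Claim_ definition above) =====
theorem maximizeSquareHoleArea_spec : Claim_equal_maximizeSquareHoleArea := by
  intro n m hBars vBars _
  unfold Spec_maximizeSquareHoleArea maximizeSquareHoleArea maximizeSquareHoleArea_alt
  simp only []
  rw [pvCore, pvLongestRun_eq, pvLongestRun_eq]
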